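-- pv_equiv track=rewrite | github.com/tomii9273/competitive_programming | library/manacher_algorithm.py | manacher_algorithm
-- ===== SOURCE A (Python) =====
-- def manacher_algorithm(s: str, interval: bool = True) -> list[int]:
--     """
--     各文字・文字の間を中心とする最長の回文の半径 ((全長 + 1) / 2) の配列を求める。O(len(s))
--     interval: 文字の間も中心とするか (配列長は 2 * len(s) - 1 になる)
--     """
--     if interval:
--         # ダミー文字を挟む
--         S = ["$"] * (2 * len(s) - 1)
--         assert "$" not in s
--         for i in range(len(s)):
--             S[2 * i] = s[i]
--     else:
--         S = list(s)
--
--     R = [0] * len(S)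
--     i = 0
--     j = 0  # S[i + j - 1] まで調べてある
--     while i < len(S):
--         while i - j >= 0 and i + j < len(S) and S[i - j] == S[i + j]:  # 一つずつ調べる
--             j += 1
--         R[i] = j
--         k = 1  # R[i - k] の結果を R[i + k] で再利用できるかもしれない
--         while i - k >= 0 and k + R[i - k] < j:  # 過去の結果をそのまま使えるなら使う
--             R[i + k] = R[i - k]
--             k += 1
--         i += k
--         j -= k
--
--     if interval:
--         # ダミー文字の影響を除外
--         for i in range(len(R)):
--             if i % 2 == 0:
--                 R[i] = (R[i] + 1) // 2
--             else:
--                 R[i] = R[i] // 2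
--
--         # 代わりに以下のようにすれば、R は半径ではなく全長の配列になる
--         # for i in range(len(R)):
--         #     if i % 2 == R[i] % 2:
--         #         R[i] -= 1
--
--     return R
-- ===== SOURCE B (Python) =====
-- def manacher_algorithm(s: str, interval: bool = True) -> list[int]:
--     """Same radii array, computed by naive expand-around-center (simpler, O(n^2))."""
--     if interval:
--         assert "$" not in s
--         S = list("$".join(s))
--     else:
--         S = list(s)
--     R = []
--     for i in range(len(S)):
--         j = 0
--         while i - j >= 0 and i + j < len(S) and S[i - j] == S[i + j]:
--             j += 1
--         R.append(j)
--     if interval: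
--         R = [(r + 1) // 2 if i % 2 == 0 else r // 2 for i, r in enumerate(R)]
--     return R
-- ===== Notes on version B (the rewrite author's own statement) =====
-- stated objective: simpler
-- what changed: A's Manacher core (inner extension loop plus the mirror-reuse copy loop over R[i-k]) is replaced by a naive expand-around-center pass that recomputes every radius from scratch; the '$' padding and the final half-radius post-processing are kept.
import Mathlib
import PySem

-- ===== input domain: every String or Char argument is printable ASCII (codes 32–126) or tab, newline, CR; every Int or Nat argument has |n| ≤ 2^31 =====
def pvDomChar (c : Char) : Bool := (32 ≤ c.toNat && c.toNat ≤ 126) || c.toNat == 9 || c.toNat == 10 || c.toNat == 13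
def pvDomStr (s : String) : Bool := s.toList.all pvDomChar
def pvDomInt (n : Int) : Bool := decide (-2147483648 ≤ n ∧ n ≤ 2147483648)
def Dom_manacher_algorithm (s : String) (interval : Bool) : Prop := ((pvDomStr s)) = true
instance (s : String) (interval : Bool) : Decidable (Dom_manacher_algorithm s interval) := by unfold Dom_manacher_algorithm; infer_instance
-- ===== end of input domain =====

-- B replaces A's Manacher mirror-reuse core with naive expand-around-center (simpler; O(n^2) instead of O(n)); padding and post-processing are unchanged.

-- ===== PORT A =====
-- inner `while`: extend the current radius j one step at a time
def manaInner (S : List Char) (i j : Int) : Int :=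
  if h : 0 ≤ i - j ∧ i + j < (S.length : Int) ∧
      PySem.List.pyGet? S (i - j) = PySem.List.pyGet? S (i + j) then
    manaInner S i (j + 1)
  else j
termination_by ((S.length : Int) - (i + j)).toNat
decreasing_by obtain ⟨h1, h2, -⟩ := h; omega

-- the `while i - k >= 0 and k + R[i - k] < j` reuse loop; returns the final (R, k).
-- R[i-k] is read under the guard 0 ≤ i - k < len R, so the total pyGetD is exact here.
def manaCopy (R : List Int) (i j k : Int) : List Int × Int :=
  if h : 0 ≤ i - k ∧ k + PySem.List.pyGetD R (i - k) 0 < j then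
    manaCopy (PySem.List.pySetD R (i + k) (PySem.List.pyGetD R (i - k) 0)) i j (k + 1)
  else (R, k)
termination_by (i - k + 1).toNat
decreasing_by obtain ⟨h1, -⟩ := h; omega

-- the copy loop leaves k no smaller; needed for manaLoop's termination
theorem manaCopy_le_snd (R : List Int) (i j k : Int) : k ≤ (manaCopy R i j k).2 := by
  rw [manaCopy]
  split
  · next h => exact le_trans (by omega) (manaCopy_le_snd _ i j (k + 1))
  · simp
termination_by (i - k + 1).toNat
decreasing_by rename_i h; obtain ⟨h1, -⟩ := h; omega

-- outer `while i < len(S)` loop, state (R, i, j)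
def manaLoop (S : List Char) (R : List Int) (i j : Int) : List Int :=
  if h : i < (S.length : Int) then
    let j' := manaInner S i j
    let p := manaCopy (PySem.List.pySetD R i j') i j' 1
    manaLoop S p.1 (i + p.2) (j' - p.2)
  else R
termination_by ((S.length : Int) - i).toNat
decreasing_by
  have := manaCopy_le_snd (PySem.List.pySetD R i (manaInner S i j)) i (manaInner S i j) 1
  omega

def manacher_algorithm (s : String) (interval : Bool) : List Int :=
  let l := s.toList
  let S : List Char :=
    if interval then
      -- S = ["$"] * (2*len(s)-1); a negative replication count yields [] — then S[2*i] = s[i]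
      (PySem.List.pyRange 0 l.length 1).foldl
        (fun S i => PySem.List.pySetD S (2 * i) (PySem.List.pyGetD l i ' '))
        (List.replicate ((2 * (l.length : Int) - 1).toNat) '$')
    else l
  let R := manaLoop S (List.replicate S.length 0) 0 0
  if interval then
    -- for i in range(len(R)): R[i] = (R[i]+1)//2 if i even else R[i]//2
    (PySem.List.pyRange 0 R.length 1).foldl
      (fun A i => PySem.List.pySetD A i
        (if i % 2 = 0 then PySem.Int.floordiv (PySem.List.pyGetD A i 0 + 1) 2
         else PySem.Int.floordiv (PySem.List.pyGetD A i 0) 2)) R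
  else R

-- ===== PORT B =====
-- naive expansion: j += 1 while the palindrome around i still extends
def expandNaive (S : List Char) (i j : Int) : Int :=
  if h : 0 ≤ i - j ∧ i + j < (S.length : Int) ∧
      PySem.List.pyGet? S (i - j) = PySem.List.pyGet? S (i + j) then
    expandNaive S i (j + 1)
  else j
termination_by ((S.length : Int) - (i + j)).toNat
decreasing_by obtain ⟨h1, h2, -⟩ := h; omega

def manacher_algorithm_alt (s : String) (interval : Bool) : List Int :=
  let S : List Char := if interval then List.intersperse '$' s.toList else s.toList
  let R := (PySem.List.pyRange 0 (S.length : Int) 1).map (fun i => expandNaive S i 0)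
  if interval then
    (PySem.List.enumerate R 0).map (fun p =>
      if p.1 % 2 = 0 then PySem.Int.floordiv (p.2 + 1) 2 else PySem.Int.floordiv p.2 2)
  else R

-- ===== PRECONDITION & SPEC =====
-- Pre_ excludes only the inputs on which A raises AssertionError: interval=True with '$' occurring in s.
def Pre_manacher_algorithm (s : String) (interval : Bool) : Prop :=
  interval = true → '$' ∉ s.toList
instance (s : String) (interval : Bool) : Decidable (Pre_manacher_algorithm s interval) := by
  unfold Pre_manacher_algorithm; infer_instance

def pvWitness_manacher_algorithm : String × Bool := ("aba", true)

def Spec_manacher_algorithm (s : String) (interval : Bool) (out : List Int) : Prop := out = manacher_algorithm_alt s interval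
instance (s : String) (interval : Bool) (out : List Int) : Decidable (Spec_manacher_algorithm s interval out) := by unfold Spec_manacher_algorithm; infer_instance

-- ===== CLAIM (what is proved, stated in full; the proofs are below) =====
def Claim_equal_manacher_algorithm : Prop := ∀ (s : String) (interval : Bool), Dom_manacher_algorithm s interval → Pre_manacher_algorithm s interval → Spec_manacher_algorithm s interval (manacher_algorithm s interval)

-- ===== LEMMAS AND PROOFS =====

def good (S : List Char) (i t : Int) : Prop :=
  0 ≤ i - t ∧ i + t < (S.length : Int) ∧
    PySem.List.pyGet? S (i - t) = PySem.List.pyGet? S (i + t)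
def pal (S : List Char) (i j : Int) : Prop := ∀ t, 0 ≤ t → t < j → good S i t
def rad (S : List Char) (i : Int) : Int := expandNaive S i 0

theorem expandNaive_spec (S : List Char) (i j : Int) (hj : 0 ≤ j) (hp : pal S i j) :
    pal S i (expandNaive S i j) ∧ ¬ good S i (expandNaive S i j) ∧ j ≤ expandNaive S i j := by
  rw [expandNaive]
  split
  · next h =>
    have hp' : pal S i (j + 1) := by
      intro t ht htj
      by_cases hlt : t < j
      · exact hp t ht hlt
      · have : t = j := by omega
        subst this; exact h
    have := expandNaive_spec S i (j + 1) (by omega) hp'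
    exact ⟨this.1, this.2.1, by omega⟩
  · next h => exact ⟨hp, h, le_refl j⟩
termination_by ((S.length : Int) - (i + j)).toNat
decreasing_by rename_i h; obtain ⟨h1, h2, -⟩ := h; omega

theorem rad_nonneg (S : List Char) (i : Int) : 0 ≤ rad S i :=
  (expandNaive_spec S i 0 le_rfl (fun t ht htj => absurd (lt_of_le_of_lt ht htj) (lt_irrefl 0))).2.2

theorem rad_pal (S : List Char) (i : Int) : pal S i (rad S i) :=
  (expandNaive_spec S i 0 le_rfl (fun t ht htj => absurd (lt_of_le_of_lt ht htj) (lt_irrefl 0))).1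

theorem rad_not_good (S : List Char) (i : Int) : ¬ good S i (rad S i) :=
  (expandNaive_spec S i 0 le_rfl (fun t ht htj => absurd (lt_of_le_of_lt ht htj) (lt_irrefl 0))).2.1

theorem rad_unique (S : List Char) (i m : Int) (hm : 0 ≤ m) (hp : pal S i m) (hng : ¬ good S i m) :
    rad S i = m := by
  rcases lt_trichotomy (rad S i) m with h | h | h
  · exact absurd (hp _ (rad_nonneg S i) h) (rad_not_good S i)
  · exact h
  · exact absurd (rad_pal S i _ hm h) hng

theorem rad_pos (S : List Char) (i : Int) (h0 : 0 ≤ i) (hn : i < (S.length : Int)) :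
    1 ≤ rad S i := by
  by_contra h
  have hr := rad_nonneg S i
  have h0' : rad S i = 0 := by omega
  exact rad_not_good S i (h0' ▸ ⟨by omega, by omega, by rw [show i - 0 = i + 0 by ring]⟩)

theorem pal_sym (S : List Char) (i j m : Int) (hp : pal S i j) (h1 : -j < m) (h2 : m < j) :
    PySem.List.pyGet? S (i + m) = PySem.List.pyGet? S (i - m) := by
  by_cases hm : 0 ≤ m
  · exact (hp m hm h2).2.2.symm
  · have := (hp (-m) (by omega) (by omega)).2.2
    rw [show i - -m = i + m by ring, show i + -m = i - m by ring] at this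
    exact this

theorem pal_shift (S : List Char) (i k rho jv t : Int) (hpi : pal S i jv) (hpk : pal S (i - k) rho)
    (hk : 1 ≤ k) (ht : 0 ≤ t) (htr : t < rho) (hkt : k + t < jv) : good S (i + k) t := by
  have g0 := hpi 0 le_rfl (by omega)
  have gkt := hpi (k + t) (by omega) hkt
  have e1 := pal_sym S i jv (k + t) hpi (by omega) hkt
  have e2 := pal_sym S i jv (k - t) hpi (by omega) (by omega)
  have e3 := (hpk t ht htr).2.2
  refine ⟨?_, by obtain ⟨-, h, -⟩ := gkt; omega, ?_⟩
  · by_cases htk : t ≤ k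
    · obtain ⟨h, -, -⟩ := g0; omega
    · have := (hpi (t - k) (by omega) (by omega)).1
      omega
  · calc PySem.List.pyGet? S (i + k - t)
        = PySem.List.pyGet? S (i + (k - t)) := by rw [show i + k - t = i + (k - t) by ring]
      _ = PySem.List.pyGet? S (i - (k - t)) := e2
      _ = PySem.List.pyGet? S (i - k + t) := by rw [show i - (k - t) = i - k + t by ring]
      _ = PySem.List.pyGet? S (i - k - t) := by
            rw [show i - k + t = (i - k) + t by ring, show i - k - t = (i - k) - t by ring]
            exact e3.symm
      _ = PySem.List.pyGet? S (i - (k + t)) := by rw [show i - k - t = i - (k + t) by ring]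
      _ = PySem.List.pyGet? S (i + (k + t)) := e1.symm
      _ = PySem.List.pyGet? S (i + k + t) := by rw [show i + (k + t) = i + k + t by ring]

theorem mirror (S : List Char) (i k : Int) (hk : 1 ≤ k) (hik : 0 ≤ i - k)
    (hlt : k + rad S (i - k) < rad S i) : rad S (i + k) = rad S (i - k) := by
  have hr0 := rad_nonneg S (i - k)
  have hpi := rad_pal S i
  have hpk := rad_pal S (i - k)
  apply rad_unique S (i + k) (rad S (i - k)) hr0
  · intro t ht htr
    exact pal_shift S i k (rad S (i - k)) (rad S i) t hpi hpk hk ht htr (by omega)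
  · intro hg
    apply rad_not_good S (i - k)
    obtain ⟨hb1, hb2, heq⟩ := hg
    have g0 := hpi 0 le_rfl (by omega)
    have gkr := hpi (k + rad S (i - k)) (by omega) (by omega)
    have e1 := pal_sym S i (rad S i) (k + rad S (i - k)) hpi (by omega) (by omega)
    have e2 := pal_sym S i (rad S i) (k - rad S (i - k)) hpi (by omega) (by omega)
    refine ⟨by obtain ⟨h, -, -⟩ := gkr; omega, ?_, ?_⟩
    · by_cases hrk : k ≤ rad S (i - k)
      · have := (hpi (rad S (i - k) - k) (by omega) (by omega)).2.1
        omega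
      · obtain ⟨-, h, -⟩ := g0; omega
    · calc PySem.List.pyGet? S (i - k - rad S (i - k))
          = PySem.List.pyGet? S (i - (k + rad S (i - k))) := by
            rw [show i - k - rad S (i - k) = i - (k + rad S (i - k)) by ring]
        _ = PySem.List.pyGet? S (i + (k + rad S (i - k))) := e1.symm
        _ = PySem.List.pyGet? S (i + k + rad S (i - k)) := by
            rw [show i + (k + rad S (i - k)) = i + k + rad S (i - k) by ring]
        _ = PySem.List.pyGet? S (i + k - rad S (i - k)) := heq.symm
        _ = PySem.List.pyGet? S (i + (k - rad S (i - k))) := by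
            rw [show i + k - rad S (i - k) = i + (k - rad S (i - k)) by ring]
        _ = PySem.List.pyGet? S (i - (k - rad S (i - k))) := e2
        _ = PySem.List.pyGet? S (i - k + rad S (i - k)) := by
            rw [show i - (k - rad S (i - k)) = i - k + rad S (i - k) by ring]

theorem cont_pal (S : List Char) (i k : Int) (hk : 1 ≤ k)
    (hexit : 0 ≤ i - k → rad S i ≤ k + rad S (i - k)) : pal S (i + k) (rad S i - k) := by
  intro t ht htj
  have hik : 0 ≤ i - k := (rad_pal S i k (by omega) (by omega)).1
  have hr := hexit hik
  exact pal_shift S i k (rad S (i - k)) (rad S i) t (rad_pal S i) (rad_pal S (i - k))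
    hk ht (by omega) (by omega)

theorem manaInner_eq_expand (S : List Char) (i j : Int) : manaInner S i j = expandNaive S i j := by
  rw [manaInner, expandNaive]
  by_cases h : 0 ≤ i - j ∧ i + j < (S.length : Int) ∧
      PySem.List.pyGet? S (i - j) = PySem.List.pyGet? S (i + j)
  · rw [dif_pos h, dif_pos h]
    exact manaInner_eq_expand S i (j + 1)
  · rw [dif_neg h, dif_neg h]
termination_by ((S.length : Int) - (i + j)).toNat
decreasing_by obtain ⟨h1, h2, -⟩ := h; omega

theorem manaInner_eq_rad (S : List Char) (i j : Int) (hj : 0 ≤ j) (hp : pal S i j) :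
    manaInner S i j = rad S i := by
  rw [manaInner_eq_expand]
  obtain ⟨h1, h2, h3⟩ := expandNaive_spec S i j hj hp
  exact (rad_unique S i _ (by omega) h1 h2).symm

theorem getD_none' {α : Type} (R : List α) (m : Int) (d : α) (hm : (R.length:Int) ≤ m) :
    PySem.List.pyGetD R m d = d := by
  apply PySem.List.pyGetD_of_none
  rw [PySem.List.pyGet?_eq_none_iff]
  simp [PySem.Raise.InRange]
  omega

theorem getD_setD' {α : Type} (R : List α) (a m : Int) (v d : α)
    (ha : 0 ≤ a) (hlt : a < (R.length : Int)) (hm : 0 ≤ m) :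
    PySem.List.pyGetD (PySem.List.pySetD R a v) m d = if m = a then v else PySem.List.pyGetD R m d := by
  rw [PySem.List.pySetD_of_nonneg R v ha]
  by_cases hmr : m < (R.length : Int)
  · rw [PySem.List.pyGetD_eq_getElem _ _ hm (by simpa using hmr),
        PySem.List.pyGetD_eq_getElem _ _ hm hmr]
    rw [List.getElem_set]
    split_ifs with h1 h2 h2 <;> first | rfl | omega
  · rw [getD_none' _ _ _ (by simpa using not_lt.mp hmr), if_neg (by omega),
        getD_none' _ _ _ (not_lt.mp hmr)]

theorem manaCopy_spec (S : List Char) (i j k : Int) (R : List Int)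
    (hk : 1 ≤ k) (hlen : R.length = S.length) (hj : rad S i = j)
    (hi0 : 0 ≤ i) (hin : i < (S.length : Int))
    (hlow : ∀ m : Int, 0 ≤ m → m ≤ i → PySem.List.pyGetD R m 0 = rad S m)
    (hmid : ∀ κ : Int, 1 ≤ κ → κ < k → PySem.List.pyGetD R (i + κ) 0 = rad S (i + κ))
    (hkj : k ≤ j) :
    (manaCopy R i j k).1.length = S.length ∧ k ≤ (manaCopy R i j k).2 ∧ (manaCopy R i j k).2 ≤ j ∧
    (∀ m : Int, 0 ≤ m → m ≤ i → PySem.List.pyGetD (manaCopy R i j k).1 m 0 = rad S m) ∧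
    (∀ κ : Int, 1 ≤ κ → κ < (manaCopy R i j k).2 →
        PySem.List.pyGetD (manaCopy R i j k).1 (i + κ) 0 = rad S (i + κ)) ∧
    (0 ≤ i - (manaCopy R i j k).2 → j ≤ (manaCopy R i j k).2 + rad S (i - (manaCopy R i j k).2)) := by
  rw [manaCopy]
  split
  · next h =>
    obtain ⟨hik, hcond0⟩ := h
    have hRik : PySem.List.pyGetD R (i - k) 0 = rad S (i - k) := hlow (i - k) hik (by omega)
    have hcond : k + rad S (i - k) < j := by omega
    have hmir : rad S (i + k) = rad S (i - k) := mirror S i k hk hik (by omega)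
    have hr0 := rad_nonneg S (i - k)
    have hikn : i + k < (S.length : Int) := (rad_pal S i k (by omega) (by omega)).2.1
    have hikR : i + k < (R.length : Int) := by omega
    have hlow' : ∀ m : Int, 0 ≤ m → m ≤ i →
        PySem.List.pyGetD (PySem.List.pySetD R (i + k) (PySem.List.pyGetD R (i - k) 0)) m 0 = rad S m := by
      intro m hm hmi
      rw [getD_setD' R (i + k) m _ 0 (by omega) hikR hm, if_neg (by omega)]
      exact hlow m hm hmi
    have hmid' : ∀ κ : Int, 1 ≤ κ → κ < k + 1 →
        PySem.List.pyGetD (PySem.List.pySetD R (i + k) (PySem.List.pyGetD R (i - k) 0)) (i + κ) 0 = rad S (i + κ) := by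
      intro κ h1 h2
      by_cases hκk : κ = k
      · subst hκk
        rw [getD_setD' R (i + κ) (i + κ) _ 0 (by omega) hikR (by omega), if_pos rfl, hRik, ← hmir]
      · rw [getD_setD' R (i + k) (i + κ) _ 0 (by omega) hikR (by omega), if_neg (by omega)]
        exact hmid κ h1 (by omega)
    have hrec := manaCopy_spec S i j (k + 1)
      (PySem.List.pySetD R (i + k) (PySem.List.pyGetD R (i - k) 0))
      (by omega) (by rw [PySem.List.length_pySetD]; exact hlen) hj hi0 hin hlow' hmid' (by omega)
    exact ⟨hrec.1, by have := hrec.2.1; omega, hrec.2.2.1, hrec.2.2.2.1, hrec.2.2.2.2.1, hrec.2.2.2.2.2⟩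
  · next h =>
    refine ⟨hlen, le_refl k, hkj, hlow, hmid, ?_⟩
    intro hik
    rcases le_or_gt j (k + rad S (i - k)) with hle | hgt
    · simpa using hle
    · exact absurd ⟨hik, by rw [hlow (i - k) hik (by omega)]; omega⟩ h
termination_by (i - k + 1).toNat
decreasing_by rename_i h; obtain ⟨h1, -⟩ := h; omega

theorem manaLoop_spec (S : List Char) (R : List Int) (i j : Int)
    (hlen : R.length = S.length) (hi : 0 ≤ i) (hj : 0 ≤ j) (hpal : pal S i j)
    (hbelow : ∀ m : Int, 0 ≤ m → m < i → PySem.List.pyGetD R m 0 = rad S m) :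
    (manaLoop S R i j).length = S.length ∧
    (∀ m : Int, 0 ≤ m → m < (S.length : Int) →
        PySem.List.pyGetD (manaLoop S R i j) m 0 = rad S m) := by
  rw [manaLoop]
  by_cases hlt : i < (S.length : Int)
  · rw [dif_pos hlt]
    have hj' : manaInner S i j = rad S i := manaInner_eq_rad S i j hj hpal
    simp only [hj']
    have hiR : i < (R.length : Int) := by omega
    have hlow : ∀ m : Int, 0 ≤ m → m ≤ i →
        PySem.List.pyGetD (PySem.List.pySetD R i (rad S i)) m 0 = rad S m := by
      intro m hm hmi
      rw [getD_setD' R i m _ 0 hi hiR hm]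
      by_cases hmi' : m = i
      · rw [if_pos hmi', hmi']
      · rw [if_neg hmi']; exact hbelow m hm (by omega)
    have cspec := manaCopy_spec S i (rad S i) 1 (PySem.List.pySetD R i (rad S i))
      le_rfl (by rw [PySem.List.length_pySetD]; exact hlen) rfl hi hlt hlow
      (by intro κ h1 h2; omega) (rad_pos S i hi hlt)
    obtain ⟨c1, c2, c3, c4, c5, c6⟩ := cspec
    have hrec := manaLoop_spec S (manaCopy (PySem.List.pySetD R i (rad S i)) i (rad S i) 1).1
      (i + (manaCopy (PySem.List.pySetD R i (rad S i)) i (rad S i) 1).2)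
      (rad S i - (manaCopy (PySem.List.pySetD R i (rad S i)) i (rad S i) 1).2)
      c1 (by omega) (by omega)
      (cont_pal S i _ (by omega) c6)
      (by
        intro m hm hmlt
        by_cases hmi' : m ≤ i
        · exact c4 m hm hmi'
        · have h5 := c5 (m - i) (by omega) (by omega)
          rw [show i + (m - i) = m by ring] at h5
          exact h5)
    exact hrec
  · rw [dif_neg hlt]
    exact ⟨hlen, fun m hm hmlt => hbelow m hm (by omega)⟩
termination_by ((S.length : Int) - i).toNat
decreasing_by omega



-- the Manacher core equals the per-index naive radii
theorem core_eq (S : List Char) :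
    manaLoop S (List.replicate S.length 0) 0 0
      = (PySem.List.pyRange 0 (S.length : Int) 1).map (fun i => expandNaive S i 0) := by
  obtain ⟨hl, hv⟩ := manaLoop_spec S (List.replicate S.length 0) 0 0
    (by simp) le_rfl le_rfl (fun t ht htj => absurd (lt_of_le_of_lt ht htj) (lt_irrefl 0))
    (fun m hm hmlt => absurd (lt_of_le_of_lt hm hmlt) (lt_irrefl 0))
  apply List.ext_getElem
  · simp [hl, PySem.List.length_pyRange_one]
  · intro m h1 h2
    have hm : m < S.length := by rw [hl] at h1; exact h1
    have hv' := hv (m : Int) (by omega) (by exact_mod_cast hm)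
    rw [PySem.List.pyGetD_eq_getElem _ _ (by omega) (by rw [hl]; exact_mod_cast hm)] at hv'
    simp only [Int.toNat_natCast] at hv'
    rw [hv']
    rw [List.getElem_map, PySem.List.getElem_pyRange_one]
    simp [rad]

theorem pad_fold_get (l : List Char) (a : Int) (acc : List Char)
    (ha0 : 0 ≤ a) (ha : a ≤ (l.length:Int)) (hacc : acc.length = 2 * l.length - 1) :
    (((PySem.List.pyRange a (l.length:Int) 1).foldl
        (fun S i => PySem.List.pySetD S (2 * i) (PySem.List.pyGetD l i ' ')) acc).length
      = 2 * l.length - 1) ∧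
    (∀ m : Int, 0 ≤ m → m < 2 * (l.length:Int) - 1 →
      PySem.List.pyGetD ((PySem.List.pyRange a (l.length:Int) 1).foldl
        (fun S i => PySem.List.pySetD S (2 * i) (PySem.List.pyGetD l i ' ')) acc) m '$'
        = if m % 2 = 0 ∧ a ≤ m / 2 then PySem.List.pyGetD l (m / 2) ' '
          else PySem.List.pyGetD acc m '$') := by
  by_cases hlt : a < (l.length:Int)
  · rw [PySem.List.pyRange_one_cons hlt, List.foldl_cons]
    have h2a : 2 * a < (acc.length : Int) := by omega
    obtain ⟨ih1, ih2⟩ := pad_fold_get l (a + 1)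
      (PySem.List.pySetD acc (2 * a) (PySem.List.pyGetD l a ' '))
      (by omega) (by omega) (by rw [PySem.List.length_pySetD]; exact hacc)
    refine ⟨ih1, ?_⟩
    intro m hm hmlt
    rw [ih2 m hm hmlt]
    rw [getD_setD' acc (2 * a) m _ '$' (by omega) h2a hm]
    split_ifs with hc1 hc2 hc2 hc3 <;> try rfl
    · omega
    · rw [show m / 2 = a by omega]
    · omega
    · omega
  · rw [PySem.List.pyRange_one_eq_nil (by omega), List.foldl_nil]
    refine ⟨hacc, ?_⟩
    intro m hm hmlt
    rw [if_neg (by omega)]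
termination_by ((l.length:Int) - a).toNat
decreasing_by omega

theorem inter_get? (l : List Char) (m : Nat) (hm : m < 2 * l.length - 1) :
    (List.intersperse '$' l)[m]? = if m % 2 = 0 then l[m / 2]? else some '$' := by
  rw [List.getElem?_intersperse]
  by_cases hpar : m % 2 = 0
  · rw [if_pos hpar, if_pos hpar]
  · rw [if_neg hpar, if_neg hpar, if_pos hm]

theorem pad_eq (l : List Char) :
    (PySem.List.pyRange 0 (l.length : Int) 1).foldl
      (fun S i => PySem.List.pySetD S (2 * i) (PySem.List.pyGetD l i ' '))
      (List.replicate ((2 * (l.length : Int) - 1).toNat) '$')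
      = List.intersperse '$' l := by
  have hacc : (List.replicate ((2 * (l.length : Int) - 1).toNat) '$').length = 2 * l.length - 1 := by
    simp; omega
  obtain ⟨h1, h2⟩ := pad_fold_get l 0 (List.replicate ((2 * (l.length : Int) - 1).toNat) '$')
    le_rfl (by omega) hacc
  apply List.ext_getElem
  · rw [h1, List.length_intersperse]
  · intro m hml hmr
    have hm : m < 2 * l.length - 1 := by rw [h1] at hml; exact hml
    have hv := h2 (m : Int) (by omega) (by omega)
    rw [PySem.List.pyGetD_eq_getElem _ _ (by omega) (by omega)] at hv
    simp only [Int.toNat_natCast] at hv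
    rw [hv]
    have hi := inter_get? l m (by omega)
    rw [List.getElem?_eq_getElem hmr] at hi
    by_cases hpar : m % 2 = 0
    · have hc : ((m:Int) % 2 = 0 ∧ (0:Int) ≤ (m:Int) / 2) := by omega
      rw [if_pos hc]
      have hhalf : m / 2 < l.length := by omega
      rw [List.getElem?_eq_getElem hhalf] at hi
      rw [if_pos hpar] at hi
      rw [PySem.List.pyGetD_eq_getElem _ _ (by omega) (by omega)]
      have hcast : ((m:Int) / 2).toNat = m / 2 := by omega
      simp only [hcast]
      exact (Option.some_injective _ hi).symm
    · rw [if_neg (by omega)]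
      rw [if_neg hpar] at hi
      have h3 : (List.intersperse '$' l)[m] = '$' := Option.some_injective _ hi
      rw [h3]
      rw [PySem.List.pyGetD_eq_getElem _ _ (by omega) (by simp; omega)]
      simp

theorem post_fold (R : List Int) (a : Int) (acc : List Int)
    (ha0 : 0 ≤ a)
    (hacc : acc.length = R.length)
    (hpres : ∀ m : Int, a ≤ m → PySem.List.pyGetD acc m 0 = PySem.List.pyGetD R m 0) :
    (((PySem.List.pyRange a (R.length:Int) 1).foldl
        (fun A i => PySem.List.pySetD A i
          (if i % 2 = 0 then PySem.Int.floordiv (PySem.List.pyGetD A i 0 + 1) 2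
           else PySem.Int.floordiv (PySem.List.pyGetD A i 0) 2)) acc).length = R.length) ∧
    (∀ m : Int, 0 ≤ m → m < (R.length:Int) →
      PySem.List.pyGetD ((PySem.List.pyRange a (R.length:Int) 1).foldl
        (fun A i => PySem.List.pySetD A i
          (if i % 2 = 0 then PySem.Int.floordiv (PySem.List.pyGetD A i 0 + 1) 2
           else PySem.Int.floordiv (PySem.List.pyGetD A i 0) 2)) acc) m 0
        = if m < a then PySem.List.pyGetD acc m 0
          else (if m % 2 = 0 then PySem.Int.floordiv (PySem.List.pyGetD R m 0 + 1) 2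
                else PySem.Int.floordiv (PySem.List.pyGetD R m 0) 2)) := by
  by_cases hlt : a < (R.length:Int)
  · rw [PySem.List.pyRange_one_cons hlt, List.foldl_cons]
    have haR : a < (acc.length : Int) := by omega
    have hva : PySem.List.pyGetD acc a 0 = PySem.List.pyGetD R a 0 := hpres _ le_rfl
    obtain ⟨ih1, ih2⟩ := post_fold R (a + 1)
      (PySem.List.pySetD acc a
        (if a % 2 = 0 then PySem.Int.floordiv (PySem.List.pyGetD acc a 0 + 1) 2
         else PySem.Int.floordiv (PySem.List.pyGetD acc a 0) 2))
      (by omega)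
      (by rw [PySem.List.length_pySetD]; exact hacc)
      (by
        intro m hma
        rw [getD_setD' acc a m _ 0 (by omega) haR (by omega), if_neg (by omega)]
        exact hpres m (by omega))
    refine ⟨ih1, ?_⟩
    intro m hm hmlt
    rw [ih2 m hm hmlt]
    by_cases hma : m < a
    · rw [if_pos (show m < a + 1 by omega), if_pos hma,
          getD_setD' acc a m _ 0 (by omega) haR (by omega), if_neg (by omega)]
    · by_cases hmeq : m = a
      · rw [if_pos (show m < a + 1 by omega), if_neg (show ¬ m < a by omega), hmeq,
            getD_setD' acc a a _ 0 (by omega) haR (by omega), if_pos rfl, hva]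
      · rw [if_neg (show ¬ m < a + 1 by omega), if_neg (show ¬ m < a by omega)]
  · rw [PySem.List.pyRange_one_eq_nil (by omega), List.foldl_nil]
    refine ⟨hacc, ?_⟩
    intro m hm hmlt
    rw [if_pos (show m < a by omega)]
termination_by ((R.length:Int) - a).toNat
decreasing_by omega

theorem post_eq (R : List Int) :
    (PySem.List.pyRange 0 (R.length : Int) 1).foldl
      (fun A i => PySem.List.pySetD A i
        (if i % 2 = 0 then PySem.Int.floordiv (PySem.List.pyGetD A i 0 + 1) 2
         else PySem.Int.floordiv (PySem.List.pyGetD A i 0) 2)) R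
      = (PySem.List.enumerate R 0).map (fun p =>
          if p.1 % 2 = 0 then PySem.Int.floordiv (p.2 + 1) 2 else PySem.Int.floordiv p.2 2) := by
  obtain ⟨h1, h2⟩ := post_fold R 0 R le_rfl rfl (fun m _ => rfl)
  apply List.ext_getElem
  · rw [h1, List.length_map, PySem.List.length_enumerate]
  · intro k hk1 hk2
    have hkR : k < R.length := by rw [h1] at hk1; exact hk1
    have hv := h2 (k:Int) (by omega) (by omega)
    rw [if_neg (by omega)] at hv
    rw [PySem.List.pyGetD_eq_getElem _ _ (by omega) (by omega)] at hv
    simp only [Int.toNat_natCast] at hv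
    rw [hv, List.getElem_map, PySem.List.getElem_enumerate]
    simp only [zero_add]
    rw [PySem.List.pyGetD_eq_getElem _ _ (by omega) (by exact_mod_cast hkR)]
    simp only [Int.toNat_natCast]

-- ===== VERDICT (by name: the statement is the Claim_ definition above) =====
theorem manacher_algorithm_spec : Claim_equal_manacher_algorithm := by
  intro s interval _ _
  unfold Spec_manacher_algorithm manacher_algorithm manacher_algorithm_alt
  cases interval <;> simp only [if_true, if_false, Bool.false_eq_true]
  · exact core_eq s.toList
  · rw [pad_eq s.toList, core_eq, post_eq]
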